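-- pv_equiv track=rewrite | github.com/SymmetricChaos/NumberTheory | Combinatorics/Factoradic.py | factoradic_permutation
-- ===== SOURCE A (Python) =====
-- def factoradic(n):
--     L = []
--     ctr = 1
--     while n > 0:
--         n, l = divmod(n,ctr)
--         L.append(l)
--         ctr += 1
--     L.reverse()
--     return L
--
-- def factoradic_permutation(L,f):
--     assert type(f) == int
--     assert f >= 0
--     F = factoradic(f)
--     out = []
--     while len(L) > len(F):
--         out.append( L.pop(0) )
--     for i in F:
--         out.append( L.pop(i) )
--     return out
-- ===== SOURCE B (Python) =====
-- def factoradic_permutation(L, f):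
--     # Return-value equivalence only: A pops elements out of L in place; B leaves L untouched.
--     assert type(f) == int
--     assert f >= 0
--     k, fa = 0, 1
--     while fa <= f:
--         k += 1
--         fa *= k
--     # now f < fa == k!, so only the last k elements are permuted
--     cut = len(L) - k
--     out = list(L[:cut])
--     rest = list(L[cut:])
--     d = fa // k if k > 0 else 1
--     while rest:
--         q, f = divmod(f, d)
--         out.append(rest.pop(q))
--         if rest:
--             d //= len(rest)
--     return out
-- ===== Notes on version B (the rewrite author's own statement) =====
-- stated objective: faster
-- what changed: B first finds the code length k (smallest k with f < k!), copies the untouched prefix of L with one slice, and unranks only the k-element tail in a single divmod-driven loop (most-significant digit first, dividing by a maintained falling factorial); A builds the reversed factoradic digit list and then pops L element by element, including popping the whole prefix with pop(0); B also leaves L unmutated where A empties it in place.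
import Mathlib
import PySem

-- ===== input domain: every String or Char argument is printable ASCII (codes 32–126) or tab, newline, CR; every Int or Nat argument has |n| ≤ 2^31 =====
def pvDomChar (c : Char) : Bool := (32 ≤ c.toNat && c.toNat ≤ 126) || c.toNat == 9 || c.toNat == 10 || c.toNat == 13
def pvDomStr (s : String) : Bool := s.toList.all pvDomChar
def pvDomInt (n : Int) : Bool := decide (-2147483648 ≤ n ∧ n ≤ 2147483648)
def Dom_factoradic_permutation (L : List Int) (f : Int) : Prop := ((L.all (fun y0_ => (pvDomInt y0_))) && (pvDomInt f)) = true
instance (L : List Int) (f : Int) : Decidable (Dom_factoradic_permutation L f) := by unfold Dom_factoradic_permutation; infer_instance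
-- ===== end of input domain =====

-- B first finds k with f < k!, copies the untouched prefix of L by one slice and unranks
-- only the k-element tail (objective: faster — A pops the prefix element by element).
-- Return-value equivalence only: A pops L empty in place, B does not mutate L.

-- ===== PORT A =====
-- while n > 0: n, l = divmod(n, ctr); L.append(l); ctr += 1   (first iteration, ctr == 1,
-- is unrolled in `factoradicA` below so that the invariant 2 ≤ ctr gives termination).
def facLoop (n ctr : Int) (acc : List Int) (h : 2 ≤ ctr) : List Int :=
  if n > 0 then
    facLoop (PySem.Int.floordiv n ctr) (ctr + 1) (acc ++ [PySem.Int.mod n ctr]) (by omega)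
  else acc
termination_by n.toNat
decreasing_by
  have h1 : PySem.Int.floordiv n ctr = n / ctr := PySem.Int.floordiv_eq_ediv_of_pos (by omega)
  have h2 : n / ctr < n := Int.ediv_lt_of_lt_mul (by omega) (by nlinarith)
  simp only [h1]; omega

def factoradicA (n : Int) : List Int :=
  (if n > 0 then
     facLoop (PySem.Int.floordiv n 1) 2 ([] ++ [PySem.Int.mod n 1]) (by omega)
   else []).reverse

-- while len(L) > len(F): out.append(L.pop(0))
def aWhile (L out : List Int) (k : Nat) : List Int × List Int :=
  if L.length > k then
    match L with
    | [] => (out, [])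
    | x :: rest => aWhile rest (out ++ [x]) k
  else (out, L)

-- for i in F: out.append(L.pop(i))   (pop out of range: Python raises IndexError; excluded by Pre_)
def aFor (rest F out : List Int) : List Int :=
  match F with
  | [] => out
  | i :: F' =>
    match PySem.List.pop? rest i with
    | none => out
    | some (x, rest') => aFor rest' F' (out ++ [x])

def factoradic_permutation (L : List Int) (f : Int) : List Int :=
  if 0 ≤ f then      -- assert f >= 0 (AssertionError excluded by Pre_)
    let F := factoradicA f
    let p := aWhile L [] F.length
    aFor p.2 F p.1
  else []

-- ===== PORT B =====
-- k, fa = 0, 1; while fa <= f: k += 1; fa *= k   (invariant 1 ≤ fa ∧ k ≤ fa gives termination)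
def kLoop (f : Int) (k : Nat) (fa : Int) (h : 1 ≤ fa ∧ (k : Int) ≤ fa) : Nat × Int :=
  if hle : fa ≤ f then
    kLoop f (k + 1) (fa * ((k : Int) + 1))
      (by refine ⟨by nlinarith [h.1], by push_cast; nlinarith [h.1, h.2]⟩)
  else (k, fa)
termination_by (2 * f.toNat + 2) - (fa.toNat + k)
decreasing_by
  have h1 : fa ≤ fa * ((k : Int) + 1) := by nlinarith [h.1]
  omega

-- while rest: q, f = divmod(f, d); out.append(rest.pop(q)); if rest: d //= len(rest)
-- (fuel = initial len(rest); the loop removes one element per iteration)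
def bLoop (fuel : Nat) (rest : List Int) (f fa : Int) (out : List Int) : List Int :=
  match fuel with
  | 0 => out
  | fuel + 1 =>
    if rest.isEmpty then out
    else
      match PySem.List.pop? rest (PySem.Int.floordiv f fa) with
      | none => out      -- IndexError (excluded by Pre_)
      | some (x, rest') =>
        bLoop fuel rest' (PySem.Int.mod f fa)
          (if rest'.isEmpty then fa else PySem.Int.floordiv fa (rest'.length : Int))
          (out ++ [x])

def factoradic_permutation_alt (L : List Int) (f : Int) : List Int :=
  if 0 ≤ f then      -- assert f >= 0
    let kf := kLoop f 0 1 (by norm_num)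
    let cut : Int := (L.length : Int) - (kf.1 : Int)
    let out := PySem.List.slice L none (some cut)
    let rest := PySem.List.slice L (some cut) none
    let d : Int := if kf.1 > 0 then PySem.Int.floordiv kf.2 (kf.1 : Int) else 1
    bLoop rest.length rest f d out
  else []

-- ===== PRECONDITION & SPEC =====
-- Pre_: exactly the inputs where the Python A returns: f ≥ 0 (else AssertionError) and
-- f < len(L)! (else a pop index leaves the shrinking list and A raises IndexError).
def Pre_factoradic_permutation (L : List Int) (f : Int) : Prop :=
  0 ≤ f ∧ f < (Nat.factorial L.length : Int)
instance (L : List Int) (f : Int) : Decidable (Pre_factoradic_permutation L f) := by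
  unfold Pre_factoradic_permutation; infer_instance

def pvWitness_factoradic_permutation : List Int × Int := ([3, 1, 4, 1], 13)

def Spec_factoradic_permutation (L : List Int) (f : Int) (out : List Int) : Prop := out = factoradic_permutation_alt L f
instance (L : List Int) (f : Int) (out : List Int) : Decidable (Spec_factoradic_permutation L f out) := by unfold Spec_factoradic_permutation; infer_instance

-- ===== CLAIM (what is proved, stated in full; the proofs are below) =====
def Claim_equal_factoradic_permutation : Prop := ∀ (L : List Int) (f : Int), Dom_factoradic_permutation L f → Pre_factoradic_permutation L f → Spec_factoradic_permutation L f (factoradic_permutation L f)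

-- ===== LEMMAS AND PROOFS =====

-- digits of the factoradic expansion, least significant first, at counter k+2
def dig (f : Int) (k : Nat) : List Int :=
  if f > 0 then
    PySem.Int.mod f ((k : Int) + 2) :: dig (PySem.Int.floordiv f ((k : Int) + 2)) (k + 1)
  else []
termination_by f.toNat
decreasing_by
  have h1 : PySem.Int.floordiv f ((k : Int) + 2) = f / ((k : Int) + 2) :=
    PySem.Int.floordiv_eq_ediv_of_pos (by omega)
  have h2 : f / ((k : Int) + 2) < f := Int.ediv_lt_of_lt_mul (by omega) (by nlinarith)
  simp only [h1]; omega

-- the full digit string of f (counter starting at 1: a leading 0 whenever f > 0)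
def digs (f : Int) : List Int := if f > 0 then (0 : Int) :: dig f 0 else []

-- ascending product c·(c+1)·…·(c+n-1)
def prodC (c : Int) : Nat → Int
  | 0 => 1
  | n + 1 => c * prodC (c + 1) n

-- most-significant-first digits, n positions
def msd : Nat → Int → List Int
  | 0, _ => []
  | n + 1, f =>
    PySem.Int.floordiv f (Nat.factorial n : Int) :: msd n (PySem.Int.mod f (Nat.factorial n : Int))

theorem prodC_pos (c : Int) (n : Nat) (hc : 0 < c) : 0 < prodC c n := by
  induction n generalizing c with
  | zero => simp [prodC]
  | succ n ih => exact mul_pos hc (ih (c + 1) (by omega))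

theorem prodC_succ_right (c : Int) (n : Nat) : prodC c (n + 1) = prodC c n * (c + n) := by
  induction n generalizing c with
  | zero => simp [prodC]
  | succ n ih =>
    have := ih (c + 1)
    simp only [prodC] at *
    rw [this]; ring_nf; push_cast; ring

theorem prodC_one (n : Nat) : prodC 1 n = (Nat.factorial n : Int) := by
  induction n with
  | zero => simp [prodC, Nat.factorial]
  | succ n ih =>
    rw [prodC_succ_right, ih, Nat.factorial_succ]
    push_cast; ring

theorem prodC_two (n : Nat) : prodC 2 n = (Nat.factorial (n + 1) : Int) := by
  have h := prodC_one (n + 1)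
  simpa [prodC] using h

theorem floordiv_small (a b : Int) (h0 : 0 ≤ a) (h1 : a < b) : PySem.Int.floordiv a b = 0 := by
  rw [PySem.Int.floordiv_eq_iff_of_pos (by omega)]; omega

theorem mod_small (a b : Int) (h0 : 0 ≤ a) (h1 : a < b) : PySem.Int.mod a b = a := by
  rw [PySem.Int.mod_eq_emod_of_pos (by omega)]
  exact Int.emod_eq_of_lt h0 h1

theorem cast_succ_add_two (k : Nat) : ((k + 1 : Nat) : Int) + 2 = ((k : Int) + 2) + 1 := by
  push_cast; ring

-- length of the dig string vs the ascending product
theorem dig_length_le_iff (n k : Nat) (f : Int) (hf : 0 ≤ f) :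
    (dig f k).length ≤ n ↔ f < prodC ((k : Int) + 2) n := by
  induction n generalizing k f with
  | zero =>
    rw [dig]
    by_cases hp : f > 0
    · rw [if_pos hp]
      simp only [List.length_cons, prodC]
      constructor <;> intro <;> omega
    · rw [if_neg hp]
      simp only [List.length_nil, Nat.zero_le, true_iff, prodC]
      omega
  | succ n ih =>
    rw [dig]
    by_cases hp : f > 0
    · have hc : (0:Int) < (k : Int) + 2 := by omega
      have hnn : 0 ≤ PySem.Int.floordiv f ((k : Int) + 2) := by
        rw [PySem.Int.floordiv_eq_ediv_of_pos hc]; exact Int.ediv_nonneg hf (by omega)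
      have hiff := ih (k + 1) (PySem.Int.floordiv f ((k : Int) + 2)) hnn
      rw [cast_succ_add_two] at hiff
      rw [if_pos hp]
      simp only [List.length_cons, Nat.add_le_add_iff_right]
      rw [hiff, PySem.Int.floordiv_lt_iff_lt_mul hc]
      simp only [prodC]
      constructor <;> intro <;> nlinarith [prodC_pos ((k : Int) + 2 + 1) n (by omega)]
    · rw [if_neg hp]
      simp only [List.length_nil, Nat.zero_le, true_iff]
      have := prodC_pos ((k : Int) + 2) (n + 1) (by omega)
      omega

theorem digs_length_le_iff (n : Nat) (f : Int) (hf : 0 ≤ f) :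
    (digs f).length ≤ n ↔ f < (Nat.factorial n : Int) := by
  unfold digs
  by_cases hp : f > 0
  · rw [if_pos hp]
    cases n with
    | zero =>
      simp only [List.length_cons, Nat.factorial]
      constructor <;> intro <;> omega
    | succ n =>
      simp only [List.length_cons, Nat.add_le_add_iff_right]
      have h := dig_length_le_iff n 0 f hf
      simp only [Nat.cast_zero, zero_add, prodC_two] at h
      exact h
  · rw [if_neg hp]
    simp only [List.length_nil, Nat.zero_le, true_iff]
    have := Nat.factorial_pos n
    omega

-- the key splitting lemma: digits of q·(c(c+1)…(c+n-1)) + r at counter c = k+2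
theorem dig_split (n k : Nat) (q r : Int) (hq0 : 0 < q) (hqn : q < (k : Int) + 2 + n)
    (hr0 : 0 ≤ r) (hrn : r < prodC ((k : Int) + 2) n) :
    dig (q * prodC ((k : Int) + 2) n + r) k
      = dig r k ++ List.replicate (n - (dig r k).length) 0 ++ [q] := by
  induction n generalizing k q r with
  | zero =>
    simp only [prodC, mul_one] at *
    have hr : r = 0 := by omega
    subst hr
    rw [show q + 0 = q by ring]
    rw [dig, if_pos (by omega : q > 0), mod_small q _ (by omega) (by omega),
      floordiv_small q _ (by omega) (by omega)]
    rw [dig, if_neg (by omega : ¬ ((0:Int) > 0)), dig, if_neg (by omega : ¬ ((0:Int) > 0))]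
    simp
  | succ n ih =>
    have hc : (0:Int) < (k : Int) + 2 := by omega
    have hP' : 0 < prodC ((k : Int) + 2 + 1) n := prodC_pos _ n (by omega)
    have hPn : prodC ((k : Int) + 2) (n + 1) = ((k : Int) + 2) * prodC ((k : Int) + 2 + 1) n := rfl
    set P' := prodC ((k : Int) + 2 + 1) n with hP'def
    have hfpos : 0 < q * prodC ((k : Int) + 2) (n + 1) + r := by
      have := prodC_pos ((k : Int) + 2) (n + 1) (by omega)
      nlinarith
    have hmod : PySem.Int.mod (q * prodC ((k : Int) + 2) (n + 1) + r) ((k : Int) + 2)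
        = PySem.Int.mod r ((k : Int) + 2) := by
      rw [PySem.Int.mod_eq_emod_of_pos hc, PySem.Int.mod_eq_emod_of_pos hc, hPn]
      rw [show q * (((k : Int) + 2) * P') + r = r + (q * P') * ((k : Int) + 2) by ring]
      exact Int.add_mul_emod_self_right _ _ _
    have hdiv : PySem.Int.floordiv (q * prodC ((k : Int) + 2) (n + 1) + r) ((k : Int) + 2)
        = q * P' + PySem.Int.floordiv r ((k : Int) + 2) := by
      rw [PySem.Int.floordiv_eq_ediv_of_pos hc, PySem.Int.floordiv_eq_ediv_of_pos hc, hPn]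
      rw [show q * (((k : Int) + 2) * P') + r = r + (q * P') * ((k : Int) + 2) by ring]
      rw [Int.add_mul_ediv_right _ _ (by omega : (k : Int) + 2 ≠ 0)]
      ring
    have hrdiv0 : 0 ≤ PySem.Int.floordiv r ((k : Int) + 2) := by
      rw [PySem.Int.floordiv_eq_ediv_of_pos hc]; exact Int.ediv_nonneg hr0 (by omega)
    have hrdivlt : PySem.Int.floordiv r ((k : Int) + 2) < P' := by
      rw [PySem.Int.floordiv_lt_iff_lt_mul hc]
      rw [hPn] at hrn; nlinarith
    have hih := ih (k + 1) q (PySem.Int.floordiv r ((k : Int) + 2)) hq0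
      (by rw [cast_succ_add_two]; push_cast at hqn ⊢; omega) hrdiv0
      (by rw [cast_succ_add_two]; exact hrdivlt)
    rw [cast_succ_add_two] at hih
    rw [dig]
    rw [if_pos hfpos, hmod, hdiv, hih]
    by_cases hrp : r > 0
    · -- r > 0 : dig r (k) = (r % c) :: dig (r/c) (k+1)
      conv_rhs => rw [dig]
      rw [if_pos hrp]
      have hlen : (dig (PySem.Int.floordiv r ((k : Int) + 2)) (k + 1)).length ≤ n := by
        rw [dig_length_le_iff n (k + 1) _ hrdiv0, cast_succ_add_two]; exact hrdivlt
      simp only [List.length_cons, List.cons_append, List.append_assoc]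
      have hcount : n + 1 - ((dig (PySem.Int.floordiv r ((k : Int) + 2)) (k + 1)).length + 1)
          = n - (dig (PySem.Int.floordiv r ((k : Int) + 2)) (k + 1)).length := by omega
      rw [hcount]
    · -- r = 0 : both digit strings of r are empty
      have hr : r = 0 := by omega
      subst hr
      rw [floordiv_small 0 _ le_rfl hc, mod_small 0 _ le_rfl hc]
      rw [dig, if_neg (by omega : ¬ ((0:Int) > 0)), dig, if_neg (by omega : ¬ ((0:Int) > 0))]
      simp [List.replicate_succ]

-- facLoop is dig with an accumulator (counter ctr = k+2)
theorem facLoop_eq (f ctr : Int) (acc : List Int) (h : 2 ≤ ctr) :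
    facLoop f ctr acc h = acc ++ dig f (ctr - 2).toNat := by
  fun_induction facLoop f ctr acc h with
  | case1 f ctr acc h hp ih =>
    have hc : ((ctr - 2).toNat : Int) + 2 = ctr := by omega
    have hc2 : (ctr + 1 - 2).toNat = (ctr - 2).toNat + 1 := by omega
    rw [dig, if_pos hp, hc]
    rw [ih, hc2]
    simp
  | case2 f ctr acc h hp =>
    rw [dig, if_neg hp]
    simp

theorem factoradicA_eq (f : Int) (_hf : 0 ≤ f) : factoradicA f = (digs f).reverse := by
  unfold factoradicA digs
  by_cases hp : f > 0
  · rw [if_pos hp, if_pos hp]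
    rw [facLoop_eq]
    have h1 : PySem.Int.mod f 1 = 0 := by
      have h := PySem.Int.mod_nonneg f (show (0:Int) < 1 by omega)
      have h' := PySem.Int.mod_lt f (show (0:Int) < 1 by omega)
      omega
    have h2 : PySem.Int.floordiv f 1 = f := by
      rw [PySem.Int.floordiv_eq_ediv_of_pos (by omega)]; simp
    rw [h1, h2]
    norm_num
  · rw [if_neg hp, if_neg hp]

-- the while loop, fused with the following for loop, is aFor with a block of 0-digits
theorem aWhile_aFor (L : List Int) (out : List Int) (F : List Int) (hk : F.length ≤ L.length) :
    aFor (aWhile L out F.length).2 F (aWhile L out F.length).1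
      = aFor L (List.replicate (L.length - F.length) 0 ++ F) out := by
  induction L generalizing out with
  | nil =>
    rw [aWhile]
    simp at hk
    simp [hk]
  | cons x rest ih =>
    rw [aWhile]
    by_cases hgt : (x :: rest).length > F.length
    · rw [if_pos hgt]
      have hstep : (x :: rest).length - F.length = (rest.length - F.length) + 1 := by
        simp only [List.length_cons] at hgt ⊢; omega
      rw [hstep, List.replicate_succ]
      have hk' : F.length ≤ rest.length := by simp only [List.length_cons] at hgt; omega
      rw [ih (out ++ [x]) hk']
      conv_rhs => simp only [aFor, List.cons_append, PySem.List.pop?_zero_cons]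
    · rw [if_neg hgt]
      have : (x :: rest).length = F.length := by
        simp only [List.length_cons] at hgt hk ⊢; omega
      rw [this]
      simp

theorem bLoop_eq (n : Nat) (rest : List Int) (f : Int) (out : List Int)
    (hlen : rest.length = n) (hf0 : 0 ≤ f) (hfn : f < (Nat.factorial n : Int)) :
    bLoop n rest f (Nat.factorial (n - 1) : Int) out = aFor rest (msd n f) out := by
  induction n generalizing rest f out with
  | zero => simp [bLoop, msd, aFor]
  | succ n ih =>
    have hne : ¬ rest.isEmpty := by
      cases rest <;> simp_all
    have hfac : (0:Int) < (Nat.factorial n : Int) := by exact_mod_cast Nat.factorial_pos n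
    have hq0 : 0 ≤ PySem.Int.floordiv f (Nat.factorial n : Int) := by
      rw [PySem.Int.floordiv_eq_ediv_of_pos hfac]; exact Int.ediv_nonneg hf0 (by omega)
    have hqlt : PySem.Int.floordiv f (Nat.factorial n : Int) < (n : Int) + 1 := by
      rw [PySem.Int.floordiv_lt_iff_lt_mul hfac]
      rw [Nat.factorial_succ] at hfn
      push_cast at hfn ⊢
      nlinarith
    set q := PySem.Int.floordiv f (Nat.factorial n : Int) with hq
    have hqnat : q.toNat < rest.length := by omega
    have hpop : PySem.List.pop? rest q = some (rest[q.toNat], rest.eraseIdx q.toNat) := by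
      have h := PySem.List.pop?_natCast rest q.toNat hqnat
      rwa [show ((q.toNat : Nat) : Int) = q by omega] at h
    have hlen' : (rest.eraseIdx q.toNat).length = n := by
      rw [List.length_eraseIdx_of_lt hqnat, hlen]
      omega
    have hr0 : 0 ≤ PySem.Int.mod f (Nat.factorial n : Int) :=
      PySem.Int.mod_nonneg f hfac
    have hrlt : PySem.Int.mod f (Nat.factorial n : Int) < (Nat.factorial n : Int) :=
      PySem.Int.mod_lt f hfac
    rw [bLoop, msd]
    simp only [Nat.add_sub_cancel]
    rw [if_neg (by simpa using hne)]
    rw [← hq]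
    simp only [hpop, aFor]
    cases n with
    | zero =>
      have h0 : rest.eraseIdx q.toNat = [] := List.eq_nil_of_length_eq_zero hlen'
      rw [h0]
      simp [bLoop, msd, aFor]
    | succ m =>
      have hne' : ¬ (rest.eraseIdx q.toNat).isEmpty := by
        have hx : (rest.eraseIdx q.toNat).length = m + 1 := hlen'
        cases h : rest.eraseIdx q.toNat <;> simp_all
      have hfa : (if (rest.eraseIdx q.toNat).isEmpty then ((Nat.factorial (m + 1) : Nat) : Int)
            else PySem.Int.floordiv ((Nat.factorial (m + 1) : Nat) : Int)
              (((rest.eraseIdx q.toNat).length : Nat) : Int))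
          = ((Nat.factorial m : Nat) : Int) := by
        rw [if_neg (by simpa using hne'), hlen', PySem.Int.floordiv_natCast]
        congr 1
        rw [Nat.factorial_succ, Nat.mul_div_cancel_left _ (by omega)]
      rw [hfa]
      exact ih _ _ _ hlen' hr0 hrlt

-- the padded reversed dig string equals the msd string, as consumed by aFor
theorem pad_msd (n : Nat) (rest : List Int) (f : Int) (out : List Int)
    (hlen : rest.length = n) (hf0 : 0 ≤ f) (hfn : f < (Nat.factorial n : Int)) :
    aFor rest (List.replicate (n - (digs f).length) 0 ++ (digs f).reverse) out
      = aFor rest (msd n f) out := by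
  induction n generalizing rest f out with
  | zero =>
    have hz : f = 0 := by simp [Nat.factorial] at hfn; omega
    subst hz
    simp [digs, msd]
  | succ n ih =>
    have hfacn : (0:Int) < (Nat.factorial n : Int) := by exact_mod_cast Nat.factorial_pos n
    obtain ⟨x, rest', rfl⟩ : ∃ x rest', rest = x :: rest' := by
      cases rest with
      | nil => simp at hlen
      | cons a b => exact ⟨a, b, rfl⟩
    have hlen' : rest'.length = n := by simpa using hlen
    by_cases hsmall : f < (Nat.factorial n : Int)
    · -- leading msd digit is 0; the pad block is nonempty
      have hl : (digs f).length ≤ n := (digs_length_le_iff n f hf0).mpr hsmall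
      have hq : PySem.Int.floordiv f (Nat.factorial n : Int) = 0 :=
        floordiv_small f _ hf0 hsmall
      have hr : PySem.Int.mod f (Nat.factorial n : Int) = f := mod_small f _ hf0 hsmall
      rw [msd, hq, hr]
      rw [show n + 1 - (digs f).length = (n - (digs f).length) + 1 by omega,
        List.replicate_succ]
      simp only [aFor, List.cons_append, PySem.List.pop?_zero_cons]
      exact ih rest' f (out ++ [x]) hlen' hf0 hsmall
    · -- n! ≤ f < (n+1)! : the digit string has full length n+1, msd head = f / n! ≥ 1
      rw [not_lt] at hsmall
      have hn1 : 1 ≤ n := by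
        rcases Nat.eq_zero_or_pos n with h0 | h1
        · subst h0; norm_num [Nat.factorial] at hsmall hfn; omega
        · exact h1
      have hq1 : 1 ≤ PySem.Int.floordiv f (Nat.factorial n : Int) := by
        rw [PySem.Int.le_floordiv_iff_mul_le hfacn]; omega
      have hqlt : PySem.Int.floordiv f (Nat.factorial n : Int) < (n : Int) + 1 := by
        rw [PySem.Int.floordiv_lt_iff_lt_mul hfacn]
        rw [Nat.factorial_succ] at hfn; push_cast at hfn ⊢; nlinarith
      set q := PySem.Int.floordiv f (Nat.factorial n : Int) with hqdef
      set r := PySem.Int.mod f (Nat.factorial n : Int) with hrdef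
      have hr0 : 0 ≤ r := PySem.Int.mod_nonneg f hfacn
      have hrlt : r < (Nat.factorial n : Int) := PySem.Int.mod_lt f hfacn
      have hfsplit : f = q * (Nat.factorial n : Int) + r := by
        rw [hqdef, hrdef]; exact (PySem.Int.floordiv_mul_add_mod f _).symm
      have hfp : f > 0 := by nlinarith
      have hP : prodC (((0 : Nat) : Int) + 2) (n - 1) = (Nat.factorial n : Int) := by
        simp only [Nat.cast_zero, zero_add]
        rw [prodC_two]
        have hx : n - 1 + 1 = n := by omega
        rw [hx]
      -- digs f = digs r ++ replicate (n - |digs r|) 0 ++ [q]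
      have hds := dig_split (n - 1) 0 q r (by omega) (by push_cast; omega) hr0
        (by rw [hP]; exact hrlt)
      rw [hP, ← hfsplit] at hds
      have hsplit : digs f = digs r ++ List.replicate (n - (digs r).length) 0 ++ [q] := by
        unfold digs
        rw [if_pos hfp]
        by_cases hrp : r > 0
        · rw [if_pos hrp]
          rw [hds]
          simp only [List.cons_append, List.append_assoc, List.length_cons]
          have hcnt : n - ((dig r 0).length + 1) = n - 1 - (dig r 0).length := by omega
          rw [hcnt]
        · rw [if_neg hrp]
          rw [show dig r 0 = [] from by rw [dig, if_neg hrp]] at hds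
          simp only [List.length_nil, Nat.sub_zero, List.nil_append] at hds ⊢
          rw [hds]
          have hcnt : n = (n - 1) + 1 := by omega
          rw [hcnt, List.replicate_succ]
          simp
      have hlr : (digs r).length ≤ n := (digs_length_le_iff n r hr0).mpr hrlt
      have hlenf : (digs f).length = n + 1 := by
        rw [hsplit]
        simp only [List.length_append, List.length_replicate, List.length_cons,
          List.length_nil]
        omega
      rw [hlenf, Nat.sub_self, List.replicate_zero, List.nil_append]
      rw [hsplit, msd, ← hqdef, ← hrdef]
      rw [List.reverse_append, List.reverse_append, List.reverse_singleton,
        List.reverse_replicate]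
      simp only [List.cons_append, List.nil_append]
      have hqnat : q.toNat < (x :: rest').length := by
        simp only [List.length_cons, hlen']; omega
      have hpop : PySem.List.pop? (x :: rest') q
          = some ((x :: rest')[q.toNat], (x :: rest').eraseIdx q.toNat) := by
        have h := PySem.List.pop?_natCast (x :: rest') q.toNat hqnat
        rwa [show ((q.toNat : Nat) : Int) = q by omega] at h
      have hlen'' : ((x :: rest').eraseIdx q.toNat).length = n := by
        rw [List.length_eraseIdx_of_lt hqnat]
        simp [hlen']
      simp only [aFor, hpop]
      exact ih ((x :: rest').eraseIdx q.toNat) r (out ++ [(x :: rest')[q.toNat]])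
        hlen'' hr0 hrlt

-- the search loop finds k = |digs f| and fa = k!
theorem kLoop_eq (f : Int) (hf : 0 ≤ f) : ∀ (k : Nat) (fa : Int) (h : 1 ≤ fa ∧ (k : Int) ≤ fa),
    fa = (Nat.factorial k : Int) → k ≤ (digs f).length →
    kLoop f k fa h = ((digs f).length, (Nat.factorial (digs f).length : Int)) := by
  intro k fa h
  fun_induction kLoop f k fa h with
  | case1 k fa h hle ih =>
    intro hfa hk
    have hnotlt : ¬ f < (Nat.factorial k : Int) := by omega
    have hklt : k < (digs f).length := by
      by_contra hcon
      exact hnotlt ((digs_length_le_iff k f hf).mp (by omega))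
    have hstep := ih (by rw [hfa]; push_cast [Nat.factorial_succ]; ring) (by omega)
    exact hstep
  | case2 k fa h hle =>
    intro hfa hk
    have hlt : f < (Nat.factorial k : Int) := by omega
    have hlen : (digs f).length ≤ k := (digs_length_le_iff k f hf).mpr hlt
    have hkeq : (digs f).length = k := le_antisymm hlen hk
    rw [hkeq, hfa]

-- below k!, the top digits of the n-position msd string are a block of zeros
theorem msd_pad (n k : Nat) (f : Int) (hkn : k ≤ n) (hf0 : 0 ≤ f)
    (hfk : f < (Nat.factorial k : Int)) :
    msd n f = List.replicate (n - k) 0 ++ msd k f := by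
  induction n with
  | zero =>
    have h0 : k = 0 := by omega
    subst h0
    simp
  | succ m ih =>
    by_cases hkm : k = m + 1
    · subst hkm
      simp
    · have hkm' : k ≤ m := by omega
      have hmono : (Nat.factorial k : Int) ≤ (Nat.factorial m : Int) := by
        exact_mod_cast Nat.factorial_le hkm'
      have hq : PySem.Int.floordiv f (Nat.factorial m : Int) = 0 :=
        floordiv_small f _ hf0 (by omega)
      have hr : PySem.Int.mod f (Nat.factorial m : Int) = f := mod_small f _ hf0 (by omega)
      rw [msd, hq, hr, ih hkm']
      rw [show m + 1 - k = (m - k) + 1 by omega, List.replicate_succ]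
      simp

-- a block of zero digits pops the prefix of the list in order
theorem aFor_zeros (j : Nat) : ∀ (rest T out : List Int), j ≤ rest.length →
    aFor rest (List.replicate j 0 ++ T) out = aFor (rest.drop j) T (out ++ rest.take j) := by
  induction j with
  | zero => intro rest T out _; simp
  | succ j ih =>
    intro rest T out hj
    obtain ⟨x, rest', rfl⟩ : ∃ x rest', rest = x :: rest' := by
      cases rest with
      | nil => simp at hj
      | cons a b => exact ⟨a, b, rfl⟩
    rw [List.replicate_succ]
    simp only [aFor, List.cons_append, PySem.List.pop?_zero_cons]
    rw [ih rest' T (out ++ [x]) (by simpa using hj)]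
    simp

-- ===== VERDICT (by name: the statement is the Claim_ definition above) =====
theorem factoradic_permutation_spec : Claim_equal_factoradic_permutation := by
  intro L f _hdom hpre
  obtain ⟨hf0, hfn⟩ := hpre
  obtain ⟨n, hn⟩ : ∃ n, L.length = n := ⟨L.length, rfl⟩
  obtain ⟨k, hkdef⟩ : ∃ k, (digs f).length = k := ⟨(digs f).length, rfl⟩
  have hkn : k ≤ n := by
    rw [← hkdef, ← hn]; exact (digs_length_le_iff L.length f hf0).mpr hfn
  have hfk : f < (Nat.factorial k : Int) := by
    rw [← hkdef]
    exact (digs_length_le_iff (digs f).length f hf0).mp le_rfl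
  unfold Spec_factoradic_permutation factoradic_permutation factoradic_permutation_alt
  rw [if_pos hf0, if_pos hf0]
  -- A's side: aFor over the msd digit string
  rw [factoradicA_eq f hf0]
  have hl : (digs f).length ≤ L.length := by omega
  have h1 := aWhile_aFor L [] (digs f).reverse (by simpa using hl)
  simp only [List.length_reverse] at h1
  simp only [List.length_reverse]
  rw [h1, pad_msd L.length L f [] rfl hf0 hfn, hn]
  rw [msd_pad n k f hkn hf0 hfk]
  rw [aFor_zeros (n - k) L (msd k f) [] (by omega)]
  -- B's side: the k-search, the two slices and the unranking loop
  rw [kLoop_eq f hf0 0 1 (by norm_num) (by norm_num [Nat.factorial]) (by omega), hkdef]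
  dsimp only
  have hcut : ((n : Int) - (k : Int)) = ((n - k : Nat) : Int) := by omega
  rw [hcut, PySem.List.slice_to_natCast, PySem.List.slice_from_natCast]
  have hrlen : (L.drop (n - k)).length = k := by
    simp [List.length_drop, hn]; omega
  have hd : (if 0 < k then PySem.Int.floordiv ((Nat.factorial k : Nat) : Int) ((k : Nat) : Int)
        else 1) = ((Nat.factorial (k - 1) : Nat) : Int) := by
    by_cases hk0 : 0 < k
    · rw [if_pos hk0, PySem.Int.floordiv_natCast]
      congr 1
      have hx : k = (k - 1) + 1 := by omega
      rw [hx, Nat.factorial_succ, Nat.mul_div_cancel_left _ (by omega)]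
      simp
    · rw [if_neg hk0]
      have hx : k = 0 := by omega
      subst hx
      norm_num [Nat.factorial]
  rw [hrlen, hd]
  rw [bLoop_eq k (L.drop (n - k)) f (L.take (n - k)) hrlen hf0 hfk]
  simp
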